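-- pv_equiv track=rewrite | github.com/Agentic-Environmental-Engineering/GymVerse | gem/gem/envs/RLVE/powernest_env.py | _convert_to_powernest
-- ===== SOURCE A (Python) =====
-- def _convert_to_powernest(n: int) -> str:
--     """Convert a positive integer to the nested power-of-two expression."""
--     assert n > 0, "n should be greater than 0"
--     memo: dict[int, str] = {}
--
--     def helper(x: int) -> str:
--         assert x > 0, "x should be greater than 0"
--         if x in memo:
--             return memo[x]
--         power = 0
--         parts: list[str] = []
--         y = x
--         while y:
--             if y & 1:
--                 if power == 0:
--                     parts.append("2(0)")
--                 elif power == 1: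
--                     parts.append("2")
--                 else:
--                     parts.append(f"2({helper(power)})")
--             y //= 2
--             power += 1
--         parts.reverse()
--         expr = "+".join(parts)
--         memo[x] = expr
--         return expr
--
--     return helper(n)
-- ===== SOURCE B (Python) =====
-- def _convert_to_powernest(n: int) -> str:
--     """Convert a positive integer to the nested power-of-two expression."""
--     assert n > 0, "n should be greater than 0"
--
--     def conv(x: int) -> str:
--         h = x.bit_length() - 1
--         term = "2(0)" if h == 0 else ("2" if h == 1 else "2(" + conv(h) + ")")
--         rest = x - (1 << h)
--         return term if rest == 0 else term + "+" + conv(rest)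
--
--     return conv(n)
-- ===== Notes on version B (the rewrite author's own statement) =====
-- stated objective: alternative
-- what changed: B replaces A's per-number LSB-first bit loop with accumulate-reverse-join (plus a memo cache) by a direct recursion that peels the highest set bit (h = bit_length-1), emits its term and recurses on the remainder, producing MSB-first order with no list, no reverse and no memo.
import Mathlib
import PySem

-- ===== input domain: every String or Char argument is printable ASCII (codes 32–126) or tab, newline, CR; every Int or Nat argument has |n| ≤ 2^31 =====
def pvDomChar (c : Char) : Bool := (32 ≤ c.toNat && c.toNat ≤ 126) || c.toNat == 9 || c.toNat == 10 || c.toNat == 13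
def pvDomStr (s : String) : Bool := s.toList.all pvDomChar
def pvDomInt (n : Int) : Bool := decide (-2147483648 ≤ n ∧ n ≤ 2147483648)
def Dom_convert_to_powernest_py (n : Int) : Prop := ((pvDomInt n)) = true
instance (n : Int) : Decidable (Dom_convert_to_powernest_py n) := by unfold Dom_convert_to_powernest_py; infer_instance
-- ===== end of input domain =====

-- B is a different decomposition: it peels the HIGHEST set bit recursively (MSB-first, no
-- accumulate-then-reverse, no memo); A enumerates bits LSB-first with a loop, reverses and joins.
-- A's `memo` is a pure cache (it never changes any returned value); the port computes the same
-- values without it, using a fuel argument only to establish termination (fuel = x is always enough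
-- since nested calls strictly decrease the argument).

-- ===== PORT A =====
mutual
-- the three-way branch inside A's loop body, in source order
def termA (fuel power : Nat) : String :=
  if power = 0 then "2(0)"
  else if power = 1 then "2"
  else "2(" ++ helperA fuel power ++ ")"
termination_by (fuel, 0, 1)
decreasing_by
  · exact Prod.Lex.right _ (Prod.Lex.right _ Nat.zero_lt_one)

-- A's `while y:` loop: append a part per set bit (LSB first), carrying `parts`
def loopA (fuel : Nat) : Nat → Nat → List String → List String
  | 0, _, parts => parts
  | y+1, power, parts =>
      loopA fuel ((y+1)/2) (power+1)
        (if (y+1) % 2 = 1 then parts ++ [termA fuel power] else parts)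
termination_by y power parts => (fuel, y, 2)
decreasing_by
  · exact Prod.Lex.right _ (Prod.Lex.left _ _ (Nat.zero_lt_succ _))
  · exact Prod.Lex.right _ (Prod.Lex.left _ _ (Nat.div_lt_self (Nat.zero_lt_succ _) (by norm_num)))

-- A's `helper`: build parts, reverse, "+".join
def helperA : Nat → Nat → String
  | 0, _ => ""
  | fuel+1, x => PySem.Str.join "+" (loopA fuel x 0 []).reverse
termination_by fuel x => (fuel, 0, 0)
decreasing_by
  · exact Prod.Lex.left _ _ (Nat.lt_succ_self _)
end

def convert_to_powernest_py (n : Int) : String := helperA n.toNat n.toNat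

-- ===== PORT B =====
-- Source B's `conv`: peel the highest set bit (h = x.bit_length()-1 = Nat.log2 x), recurse on the rest.
-- The `x = 0` guard only makes the recursion total; Python never calls conv with x ≤ 0.
def convB (x : Nat) : String :=
  if hx : x = 0 then ""
  else
    let h := Nat.log2 x
    let term := if h = 0 then "2(0)" else if h = 1 then "2" else "2(" ++ convB h ++ ")"
    let rest := x - 2^h
    if rest = 0 then term else term ++ "+" ++ convB rest
termination_by x
decreasing_by
  · exact lt_of_lt_of_le (Nat.lt_two_pow_self) (Nat.log2_self_le hx)
  · exact Nat.sub_lt (Nat.pos_of_ne_zero hx) (Nat.two_pow_pos _)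

def convert_to_powernest_py_alt (n : Int) : String := convB n.toNat

-- ===== PRECONDITION & SPEC =====
-- Python A asserts n > 0 (AssertionError otherwise): Pre_ admits exactly the inputs where A returns.
def Pre_convert_to_powernest_py (n : Int) : Prop := 0 < n
instance (n : Int) : Decidable (Pre_convert_to_powernest_py n) := by unfold Pre_convert_to_powernest_py; infer_instance
def pvWitness_convert_to_powernest_py : Int := (5)

def Spec_convert_to_powernest_py (n : Int) (out : String) : Prop := out = convert_to_powernest_py_alt n
instance (n : Int) (out : String) : Decidable (Spec_convert_to_powernest_py n out) := by unfold Spec_convert_to_powernest_py; infer_instance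

-- ===== CLAIM =====
def Claim_equal_convert_to_powernest_py : Prop := ∀ (n : Int), Dom_convert_to_powernest_py n → Pre_convert_to_powernest_py n → Spec_convert_to_powernest_py n (convert_to_powernest_py n)

-- ===== LEMMAS AND PROOFS =====

-- the per-bit part list A's loop produces, without the accumulator
def LA (fuel : Nat) : Nat → Nat → List String
  | 0, _ => []
  | y+1, power =>
      (if (y+1) % 2 = 1 then [termA fuel power] else []) ++ LA fuel ((y+1)/2) (power+1)
termination_by y => y
decreasing_by
  · exact Nat.div_lt_self (Nat.zero_lt_succ _) (by norm_num)

theorem join_singleton (a : String) : PySem.Str.join "+" [a] = a := by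
  apply String.toList_inj.mp
  rw [PySem.Str.toList_join]; simp [PySem.Chars.join_singleton]

theorem join_cons (a : String) (l : List String) (h : l ≠ []) :
    PySem.Str.join "+" (a :: l) = a ++ "+" ++ PySem.Str.join "+" l := by
  obtain ⟨b, l', rfl⟩ := List.exists_cons_of_ne_nil h
  apply String.toList_inj.mp
  rw [PySem.Str.toList_join]
  simp [PySem.Chars.join_cons_cons, PySem.Str.toList_join]

theorem loopA_eq (fuel : Nat) : ∀ y power parts, loopA fuel y power parts = parts ++ LA fuel y power := by
  intro y
  induction y using Nat.strong_induction_on with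
  | _ y ih =>
    intro power parts
    match y with
    | 0 => simp [loopA, LA]
    | y+1 =>
      rw [loopA, LA, ih ((y+1)/2) (Nat.div_lt_self (Nat.zero_lt_succ _) one_lt_two)]
      split <;> simp

theorem LA_step (fuel y power : Nat) :
    LA fuel y power = (if y % 2 = 1 then [termA fuel power] else []) ++ LA fuel (y/2) (power+1) := by
  match y with
  | 0 => simp [LA]
  | y+1 => rw [LA]

theorem LA_ne_nil (fuel : Nat) : ∀ y power, 0 < y → LA fuel y power ≠ [] := by
  intro y
  induction y using Nat.strong_induction_on with
  | _ y ih =>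
    intro power hy
    rw [LA_step]
    rcases Nat.lt_or_ge y 2 with h2 | h2
    · interval_cases y
      · simp
    · have hy2 : 0 < y / 2 := Nat.div_pos h2 (by norm_num)
      have := ih (y/2) (Nat.div_lt_self hy (by norm_num)) (power+1) hy2
      split <;> simp [this]

theorem log2_two_le (y : Nat) (h : 2 ≤ y) : Nat.log2 y = Nat.log2 (y/2) + 1 := by
  rw [Nat.log2_def, if_pos h]

theorem LA_topbit (fuel : Nat) : ∀ y power, 0 < y →
    LA fuel y power = LA fuel (y - 2^(Nat.log2 y)) power ++ [termA fuel (power + Nat.log2 y)] := by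
  intro y
  induction y using Nat.strong_induction_on with
  | _ y ih =>
    intro power hy
    rcases Nat.lt_or_ge y 2 with h2 | h2
    · interval_cases y
      · simp [LA, show Nat.log2 1 = 0 from rfl]
    · -- y ≥ 2
      have hlog : Nat.log2 y = Nat.log2 (y/2) + 1 := log2_two_le y h2
      have hple : 2 ^ Nat.log2 y ≤ y := Nat.log2_self_le (by omega)
      have hk : 2 ^ Nat.log2 y = 2 * 2 ^ Nat.log2 (y/2) := by rw [hlog, pow_succ]; ring
      set k := 2 ^ Nat.log2 (y/2) with hkdef
      have hkpos : 0 < k := Nat.two_pow_pos _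
      have hy2 : 0 < y / 2 := Nat.div_pos h2 (by norm_num)
      have ih2 := ih (y/2) (Nat.div_lt_self hy (by norm_num)) (power+1) hy2
      have hmod : (y - 2 ^ Nat.log2 y) % 2 = y % 2 := by omega
      have hdiv : (y - 2 ^ Nat.log2 y) / 2 = y / 2 - k := by omega
      rw [LA_step, ih2, LA_step fuel (y - 2 ^ Nat.log2 y) power, hmod, hdiv]
      have harg : power + 1 + Nat.log2 (y/2) = power + Nat.log2 y := by omega
      rw [harg]
      split <;> simp [hkdef]

-- the term B builds for the highest set bit of x
def tB (x : Nat) : String :=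
  if Nat.log2 x = 0 then "2(0)" else if Nat.log2 x = 1 then "2" else "2(" ++ convB (Nat.log2 x) ++ ")"

theorem convB_eq (x : Nat) (hx : ¬ x = 0) :
    convB x = (if x - 2 ^ Nat.log2 x = 0 then tB x else tB x ++ "+" ++ convB (x - 2 ^ Nat.log2 x)) := by
  rw [convB, dif_neg hx, tB]

theorem main_ind : ∀ x, 0 < x → ∀ f,
    (x ≤ f + 1 → PySem.Str.join "+" (LA f x 0).reverse = convB x) ∧
    (x ≤ f → helperA f x = convB x) := by
  intro x
  induction x using Nat.strong_induction_on with
  | _ x ih =>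
    intro hx f
    have hlt : Nat.log2 x < x :=
      lt_of_lt_of_le (Nat.lt_two_pow_self) (Nat.log2_self_le (by omega))
    have part1 : ∀ g, x ≤ g + 1 → PySem.Str.join "+" (LA g x 0).reverse = convB x := by
      intro g hxf
      rw [LA_topbit g x 0 hx]
      have hterm : termA g (0 + Nat.log2 x) = tB x := by
        rw [termA, Nat.zero_add, tB]
        by_cases h0 : Nat.log2 x = 0
        · simp [h0]
        · by_cases h1 : Nat.log2 x = 1
          · simp [h1]
          · have hrec : helperA g (Nat.log2 x) = convB (Nat.log2 x) :=
              (ih (Nat.log2 x) hlt (Nat.pos_of_ne_zero h0) g).2 (by omega)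
            simp [h0, h1, hrec]
      rw [convB_eq x (by omega)]
      rcases Nat.eq_zero_or_pos (x - 2 ^ Nat.log2 x) with hr0 | hrpos
      · rw [hr0, if_pos rfl]
        simp only [LA, List.nil_append, List.reverse_cons, List.reverse_nil, List.nil_append]
        rw [join_singleton, hterm]
      · have hrlt : x - 2 ^ Nat.log2 x < x := by
          have := Nat.two_pow_pos (Nat.log2 x); omega
        have hrec := (ih _ hrlt hrpos g).1 (by omega)
        have hne : (LA g (x - 2 ^ Nat.log2 x) 0).reverse ≠ [] := by
          simpa using LA_ne_nil g _ 0 hrpos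
        rw [if_neg (by omega), List.reverse_append, List.reverse_singleton,
            List.singleton_append, join_cons _ _ hne, hrec, hterm]
    refine ⟨part1 f, ?_⟩
    intro hxf
    match f with
    | 0 => omega
    | g+1 =>
      rw [helperA, loopA_eq, List.nil_append]
      exact part1 g (by omega)

-- ===== VERDICT =====
theorem convert_to_powernest_py_spec : Claim_equal_convert_to_powernest_py := by
  intro n _ hpre
  unfold Spec_convert_to_powernest_py convert_to_powernest_py convert_to_powernest_py_alt
  have hx : 0 < n.toNat := by unfold Pre_convert_to_powernest_py at hpre; omega
  exact (main_ind n.toNat hx n.toNat).2 le_rfl
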